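-- pv_equiv track=rewrite | github.com/USEPA/FDTool | fdtool/modules/dbschema/dbschema.py | keyBaseSets
-- ===== SOURCE A (Python) =====
-- def keyBaseSets(attr,abh):
--   # group attributes in 4 different base setes:
--   #  0.) attributes that do not occur in rules
--   #  1.) attributes found on the left side only
--   #  2.) attrs found on the right side only
--   #  3.) attributes found on both sides of a rule
--   attrch = dict( [ (a,0) for a in attr ] )
--   for (li,re) in abh.items():
--     for l in li: attrch[l] = attrch[l] | 1;
--     for r in re: attrch[r] = attrch[r] | 2;
--   sets = ( set(), set(), set(), set() )
--   for (a,ch) in attrch.items():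
--     sets[ch].add(a);
--   return sets;
-- ===== SOURCE B (Python) =====
-- def keyBaseSets(attr, abh):
--   # every attribute a rule mentions must be a declared attribute
--   declared = set(attr)
--   L, R = set(), set()
--   for (li, re) in abh.items():
--     for x in (*li, *re):
--       if x not in declared:
--         raise ValueError(f"rule mentions undeclared attribute {x!r}")
--     L.update(li)
--     R.update(re)
--   # classify each declared attribute by where it occurs
--   return ({a for a in attr if a not in L and a not in R},
--           {a for a in attr if a in L and a not in R},
--           {a for a in attr if a not in L and a in R},
--           {a for a in attr if a in L and a in R})
-- ===== Notes on version B (the rewrite author's own statement) =====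
-- stated objective: simpler
-- what changed: B replaces A's per-attribute bitmask dictionary (build a dict of OR-ed flags, then dispatch each attribute into the tuple slot indexed by its flag) with an up-front validation of the rules against the declared attributes followed by two occurrence sets L and R collected in one pass, the four buckets read off by membership tests; Pre_ excludes inputs where a rule mentions an undeclared attribute, on which A raises KeyError (B raises ValueError) and returns no value.
import Mathlib
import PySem

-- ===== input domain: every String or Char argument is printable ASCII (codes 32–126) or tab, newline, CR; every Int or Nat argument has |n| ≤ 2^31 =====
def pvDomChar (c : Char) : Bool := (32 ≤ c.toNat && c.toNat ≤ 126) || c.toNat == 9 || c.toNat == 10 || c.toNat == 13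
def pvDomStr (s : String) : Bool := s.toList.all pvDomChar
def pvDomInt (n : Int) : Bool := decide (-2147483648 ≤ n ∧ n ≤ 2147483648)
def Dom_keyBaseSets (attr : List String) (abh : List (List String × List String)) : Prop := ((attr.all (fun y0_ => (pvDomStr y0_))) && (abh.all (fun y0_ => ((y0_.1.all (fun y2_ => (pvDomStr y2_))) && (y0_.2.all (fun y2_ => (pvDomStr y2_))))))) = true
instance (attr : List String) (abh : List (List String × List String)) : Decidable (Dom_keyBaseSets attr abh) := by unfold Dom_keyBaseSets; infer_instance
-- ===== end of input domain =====

-- B replaces A's per-attribute bitmask dict by two occurrence sets (union of all left sides, union of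
-- all right sides) and derives the four buckets by membership tests — an alternative decomposition.

-- ===== PORT A =====
-- Python's tuple indexing sets[ch].add(a) is ported as an if-chain on ch (the stored values are only
-- 0, 0|1, 0|2, bor results, hence in {0,1,2,3}); attrch[l] (KeyError when the key is absent) is ported
-- with getD, exact under Pre_keyBaseSets, which guarantees every rule attribute is a key of attrch.
def keyBaseSets (attr : List String) (abh : List (List String × List String)) :
    List String × List String × List String × List String :=
  let attrch : PySem.Dict String Int := PySem.Dict.ofList (attr.map (fun a => (a, 0)))
  let attrch := abh.foldl (fun d p =>
    let d := p.1.foldl (fun d l => d.insert l (PySem.Int.bor (d.getD l 0) 1)) d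
    p.2.foldl (fun d r => d.insert r (PySem.Int.bor (d.getD r 0) 2)) d) attrch
  attrch.items.foldl
    (fun (s : PySem.Set String × PySem.Set String × PySem.Set String × PySem.Set String) p =>
      if p.2 = 0 then (PySem.Set.add s.1 p.1, s.2.1, s.2.2.1, s.2.2.2)
      else if p.2 = 1 then (s.1, PySem.Set.add s.2.1 p.1, s.2.2.1, s.2.2.2)
      else if p.2 = 2 then (s.1, s.2.1, PySem.Set.add s.2.2.1 p.1, s.2.2.2)
      else (s.1, s.2.1, s.2.2.1, PySem.Set.add s.2.2.2 p.1))
    (PySem.Set.empty, PySem.Set.empty, PySem.Set.empty, PySem.Set.empty)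

-- ===== PORT B =====
-- Source B first validates that every rule attribute is declared (raising ValueError otherwise) and only
-- then accumulates L and R; under Pre_keyBaseSets the validation always passes, so the loop reduces to
-- the pure L/R accumulation ported here (outside Pre_ the Python raises and nothing is claimed).
def keyBaseSets_alt (attr : List String) (abh : List (List String × List String)) :
    List String × List String × List String × List String :=
  let LR := abh.foldl (fun (s : PySem.Set String × PySem.Set String) p =>
      (PySem.Set.update s.1 p.1, PySem.Set.update s.2 p.2))
    (PySem.Set.empty, PySem.Set.empty)
  let L := LR.1
  let R := LR.2
  (PySem.Set.ofList (attr.filter (fun a => !(PySem.Set.contains L a) && !(PySem.Set.contains R a))),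
   PySem.Set.ofList (attr.filter (fun a => PySem.Set.contains L a && !(PySem.Set.contains R a))),
   PySem.Set.ofList (attr.filter (fun a => !(PySem.Set.contains L a) && PySem.Set.contains R a)),
   PySem.Set.ofList (attr.filter (fun a => PySem.Set.contains L a && PySem.Set.contains R a)))

-- ===== PRECONDITION & SPEC =====
-- Pre_ excludes exactly the inputs on which a rule mentions an attribute absent from attr: there
-- A raises KeyError (attrch[l] / attrch[r] on a missing key) and returns no value.
def Pre_keyBaseSets (attr : List String) (abh : List (List String × List String)) : Prop :=
  ∀ p ∈ abh, (∀ x ∈ p.1, x ∈ attr) ∧ (∀ x ∈ p.2, x ∈ attr)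
instance (attr : List String) (abh : List (List String × List String)) : Decidable (Pre_keyBaseSets attr abh) := by unfold Pre_keyBaseSets; infer_instance

def pvWitness_keyBaseSets : List String × (List (List String × List String)) :=
  (["a", "b", "c", "d"], [(["a"], ["b", "c"]), (["c"], ["c"])])

def Spec_keyBaseSets (attr : List String) (abh : List (List String × List String)) (out : List String × List String × List String × List String) : Prop := out = keyBaseSets_alt attr abh
instance (attr : List String) (abh : List (List String × List String)) (out : List String × List String × List String × List String) : Decidable (Spec_keyBaseSets attr abh out) := by unfold Spec_keyBaseSets; infer_instance

-- ===== CLAIM (what is proved, stated in full; the proofs are below) =====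
def Claim_equal_keyBaseSets : Prop := ∀ (attr : List String) (abh : List (List String × List String)), Dom_keyBaseSets attr abh → Pre_keyBaseSets attr abh → Spec_keyBaseSets attr abh (keyBaseSets attr abh)

-- ===== LEMMAS AND PROOFS =====

lemma pv_decide_or (p q : Prop) [Decidable p] [Decidable q] :
    decide (p ∨ q) = (decide p || decide q) := by
  by_cases p <;> by_cases q <;> simp [*]

-- the bitmask A stores for an attribute: bit 1 = occurs on a left side, bit 2 = occurs on a right side
def pvMask (bl br : Bool) : Int := (if bl then 1 else 0) + (if br then 2 else 0)

lemma pv_inner1 (l : List String) (d : PySem.Dict String Int) (f g : String → Bool)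
    (h : ∀ a, d.getD a 0 = pvMask (f a) (g a)) (a : String) :
    (l.foldl (fun d x => d.insert x (PySem.Int.bor (d.getD x 0) 1)) d).getD a 0
      = pvMask (f a || decide (a ∈ l)) (g a) := by
  induction l generalizing d f with
  | nil => simp [h]
  | cons x xs ih =>
    rw [List.foldl_cons]
    rw [ih _ (fun b => f b || decide (b = x)) ?_]
    · congr 1
      simp [List.mem_cons, pv_decide_or, Bool.or_assoc]
    · intro b
      rw [PySem.Dict.getD_insert, h x]
      by_cases hb : b = x
      · subst hb
        simp only [if_pos rfl]
        cases hf : f b <;> cases hg : g b <;> simp [pvMask, hf, hg] <;> decide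
      · simp [hb, h b]

lemma pv_inner2 (l : List String) (d : PySem.Dict String Int) (f g : String → Bool)
    (h : ∀ a, d.getD a 0 = pvMask (f a) (g a)) (a : String) :
    (l.foldl (fun d x => d.insert x (PySem.Int.bor (d.getD x 0) 2)) d).getD a 0
      = pvMask (f a) (g a || decide (a ∈ l)) := by
  induction l generalizing d g with
  | nil => simp [h]
  | cons x xs ih =>
    rw [List.foldl_cons]
    rw [ih _ (fun b => g b || decide (b = x)) ?_]
    · congr 1
      simp [List.mem_cons, pv_decide_or, Bool.or_assoc]
    · intro b
      rw [PySem.Dict.getD_insert, h x]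
      by_cases hb : b = x
      · subst hb
        simp only [if_pos rfl]
        cases hf : f b <;> cases hg : g b <;> simp [pvMask, hf, hg] <;> decide
      · simp [hb, h b]

lemma pv_outer (abh : List (List String × List String)) (d : PySem.Dict String Int)
    (f g : String → Bool) (h : ∀ a, d.getD a 0 = pvMask (f a) (g a)) (a : String) :
    (abh.foldl (fun d p =>
      let d := p.1.foldl (fun d l => d.insert l (PySem.Int.bor (d.getD l 0) 1)) d
      p.2.foldl (fun d r => d.insert r (PySem.Int.bor (d.getD r 0) 2)) d) d).getD a 0
      = pvMask (f a || decide (∃ p ∈ abh, a ∈ p.1)) (g a || decide (∃ p ∈ abh, a ∈ p.2)) := by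
  induction abh generalizing d f g with
  | nil => simp [h]
  | cons p ps ih =>
    rw [List.foldl_cons]
    rw [ih _ (fun b => f b || decide (b ∈ p.1)) (fun b => g b || decide (b ∈ p.2)) ?_]
    · have he1 : (∃ q ∈ p :: ps, a ∈ q.1) ↔ (a ∈ p.1 ∨ ∃ q ∈ ps, a ∈ q.1) := by
        simp [List.mem_cons, exists_eq_or_imp]
      have he2 : (∃ q ∈ p :: ps, a ∈ q.2) ↔ (a ∈ p.2 ∨ ∃ q ∈ ps, a ∈ q.2) := by
        simp [List.mem_cons, exists_eq_or_imp]
      congr 1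
      · rw [decide_eq_decide.mpr he1, pv_decide_or, Bool.or_assoc]
      · rw [decide_eq_decide.mpr he2, pv_decide_or, Bool.or_assoc]
    · intro b
      exact pv_inner2 p.2 _ _ _ (fun c => pv_inner1 p.1 d f g h c) b

lemma pv_getD_init (ps : List (String × Int)) (d : PySem.Dict String Int)
    (h : ∀ a, d.getD a 0 = 0) (hz : ∀ p ∈ ps, p.2 = 0) (a : String) :
    (ps.foldl (fun acc p => acc.insert p.1 p.2) d).getD a 0 = 0 := by
  induction ps generalizing d with
  | nil => exact h a
  | cons p ps ih =>
    rw [List.foldl_cons]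
    refine ih _ ?_ (fun q hq => hz q (by simp [hq]))
    intro b
    rw [PySem.Dict.getD_insert]
    split
    · exact hz p (by simp)
    · exact h b

lemma pv_update_self (s : PySem.Set String) (xs : List String) (h : ∀ x ∈ xs, x ∈ s) :
    PySem.Set.update s xs = s := by
  rw [PySem.Set.update_eq_append_filter]
  have hnil : List.filter (fun y => !s.contains y) (PySem.Set.ofList xs) = [] := by
    refine List.filter_eq_nil_iff.mpr ?_
    intro y hy
    have hmem : y ∈ s := h y ((PySem.Set.mem_ofList xs y).mp hy)
    simpa using hmem
  rw [hnil, List.append_nil]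

lemma pv_keys_loop (abh : List (List String × List String)) (attr : List String)
    (d : PySem.Dict String Int) (hk : d.keys = PySem.Set.ofList attr)
    (hp : ∀ p ∈ abh, (∀ x ∈ p.1, x ∈ attr) ∧ (∀ x ∈ p.2, x ∈ attr)) :
    (abh.foldl (fun d p =>
      let d := p.1.foldl (fun d l => d.insert l (PySem.Int.bor (d.getD l 0) 1)) d
      p.2.foldl (fun d r => d.insert r (PySem.Int.bor (d.getD r 0) 2)) d) d).keys
      = PySem.Set.ofList attr := by
  induction abh generalizing d with
  | nil => exact hk
  | cons p ps ih =>
    rw [List.foldl_cons]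
    refine ih _ ?_ (fun q hq => hp q (by simp [hq]))
    show (p.2.foldl (fun d r => d.insert r (PySem.Int.bor (d.getD r 0) 2))
      (p.1.foldl (fun d l => d.insert l (PySem.Int.bor (d.getD l 0) 1)) d)).keys
      = PySem.Set.ofList attr
    rw [PySem.Dict.keys_foldl_insert, PySem.Dict.keys_foldl_insert, hk,
        pv_update_self _ _ (fun x hx => (PySem.Set.mem_ofList attr x).mpr ((hp p (by simp)).1 x hx)),
        pv_update_self _ _ (fun x hx => (PySem.Set.mem_ofList attr x).mpr ((hp p (by simp)).2 x hx))]

lemma pv_items_eq (d : PySem.Dict String Int) (h : d.keys.Nodup) :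
    d.items = d.keys.map (fun k => (k, d.getD k 0)) := by
  refine List.ext_getElem (by simp [PySem.Dict.keys]) ?_
  intro i h1 h2
  have hm : (d.items[i].1, d.items[i].2) ∈ d.items := by
    simpa using List.getElem_mem h1
  have hv := PySem.Dict.getD_of_mem_items d hm h 0
  simp [PySem.Dict.keys, hv]

lemma pv_buckets (its : List (String × Int)) (s0 s1 s2 s3 : PySem.Set String)
    (hn : (its.map Prod.fst).Nodup)
    (h : ∀ x ∈ its.map Prod.fst, x ∉ s0 ∧ x ∉ s1 ∧ x ∉ s2 ∧ x ∉ s3) :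
    its.foldl (fun (s : PySem.Set String × PySem.Set String × PySem.Set String × PySem.Set String) p =>
      if p.2 = 0 then (PySem.Set.add s.1 p.1, s.2.1, s.2.2.1, s.2.2.2)
      else if p.2 = 1 then (s.1, PySem.Set.add s.2.1 p.1, s.2.2.1, s.2.2.2)
      else if p.2 = 2 then (s.1, s.2.1, PySem.Set.add s.2.2.1 p.1, s.2.2.2)
      else (s.1, s.2.1, s.2.2.1, PySem.Set.add s.2.2.2 p.1)) (s0, s1, s2, s3)
    = (s0 ++ (its.filter (fun p => p.2 = 0)).map Prod.fst,
       s1 ++ (its.filter (fun p => p.2 = 1)).map Prod.fst,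
       s2 ++ (its.filter (fun p => p.2 = 2)).map Prod.fst,
       s3 ++ (its.filter (fun p => p.2 ≠ 0 ∧ p.2 ≠ 1 ∧ p.2 ≠ 2)).map Prod.fst) := by
  induction its generalizing s0 s1 s2 s3 with
  | nil => simp
  | cons p ps ih =>
    rw [List.map_cons, List.nodup_cons] at hn
    have ha := h p.1 (by simp)
    have hps : ∀ x ∈ ps.map Prod.fst, x ≠ p.1 := by
      intro x hx hxe
      exact hn.1 (hxe ▸ hx)
    have h' : ∀ x ∈ ps.map Prod.fst, x ∉ s0 ∧ x ∉ s1 ∧ x ∉ s2 ∧ x ∉ s3 :=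
      fun x hx => h x (by simp [hx])
    rw [List.foldl_cons]
    by_cases h0 : p.2 = 0
    · simp only [if_pos h0]
      rw [PySem.Set.add_of_not_mem ha.1]
      rw [ih (s0 ++ [p.1]) s1 s2 s3 hn.2 ?_]
      · simp [List.filter_cons, h0, List.append_assoc]
      · intro x hx
        refine ⟨?_, (h' x hx).2.1, (h' x hx).2.2.1, (h' x hx).2.2.2⟩
        simp [List.mem_append, (h' x hx).1, hps x hx]
    · by_cases h1 : p.2 = 1
      · simp only [if_neg h0, if_pos h1]
        rw [PySem.Set.add_of_not_mem ha.2.1]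
        rw [ih s0 (s1 ++ [p.1]) s2 s3 hn.2 ?_]
        · simp [List.filter_cons, h0, h1, List.append_assoc]
        · intro x hx
          refine ⟨(h' x hx).1, ?_, (h' x hx).2.2.1, (h' x hx).2.2.2⟩
          simp [List.mem_append, (h' x hx).2.1, hps x hx]
      · by_cases h2 : p.2 = 2
        · simp only [if_neg h0, if_neg h1, if_pos h2]
          rw [PySem.Set.add_of_not_mem ha.2.2.1]
          rw [ih s0 s1 (s2 ++ [p.1]) s3 hn.2 ?_]
          · simp [List.filter_cons, h0, h1, h2, List.append_assoc]
          · intro x hx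
            refine ⟨(h' x hx).1, (h' x hx).2.1, ?_, (h' x hx).2.2.2⟩
            simp [List.mem_append, (h' x hx).2.2.1, hps x hx]
        · simp only [if_neg h0, if_neg h1, if_neg h2]
          rw [PySem.Set.add_of_not_mem ha.2.2.2]
          rw [ih s0 s1 s2 (s3 ++ [p.1]) hn.2 ?_]
          · simp [List.filter_cons, h0, h1, h2, List.append_assoc]
          · intro x hx
            refine ⟨(h' x hx).1, (h' x hx).2.1, (h' x hx).2.2.1, ?_⟩
            simp [List.mem_append, (h' x hx).2.2.2, hps x hx]

lemma pv_map_filter (l : List String) (v : String → Int) (c : Int → Bool) :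
    ((l.map (fun k => (k, v k))).filter (fun p => c p.2)).map Prod.fst
      = l.filter (fun k => c (v k)) := by
  induction l with
  | nil => rfl
  | cons x xs ih => by_cases hc : c (v x) <;> simp [List.filter_cons, hc, ih]

lemma pv_mem_foldl_update (F : (List String × List String) → List String)
    (abh : List (List String × List String)) (s : PySem.Set String) (a : String) :
    a ∈ abh.foldl (fun s p => PySem.Set.update s (F p)) s ↔ a ∈ s ∨ ∃ p ∈ abh, a ∈ F p := by
  induction abh generalizing s with
  | nil => simp
  | cons p ps ih =>
    rw [List.foldl_cons, ih]
    simp [PySem.Set.mem_update, or_assoc]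

lemma pv_ofList_filter (xs : List String) (p : String → Bool) :
    PySem.Set.ofList (xs.filter p) = (PySem.Set.ofList xs).filter p := by
  induction xs with
  | nil => rfl
  | cons x xs ih =>
    rw [List.filter_cons, PySem.Set.ofList_cons]
    by_cases hp : p x = true
    · rw [if_pos hp, PySem.Set.ofList_cons, ih, List.filter_cons, if_pos hp]
      congr 1
      simp only [PySem.Set.discard, List.filter_filter]
      refine List.filter_congr ?_
      intro y _
      cases p y <;> simp
    · rw [if_neg hp, ih, List.filter_cons, if_neg hp]
      simp only [PySem.Set.discard, List.filter_filter]
      refine List.filter_congr ?_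
      intro y _
      by_cases hy : y = x
      · subst hy
        simp [Bool.eq_false_iff.mpr hp]
      · simp [hy]

-- A's result, written as filters of the deduplicated attribute list by the stored bitmask
lemma pv_A_form (attr : List String) (abh : List (List String × List String))
    (hin : ∀ p ∈ abh, (∀ x ∈ p.1, x ∈ attr) ∧ (∀ x ∈ p.2, x ∈ attr)) :
    keyBaseSets attr abh =
      ((PySem.Set.ofList attr).filter (fun a => decide (pvMask (decide (∃ p ∈ abh, a ∈ p.1)) (decide (∃ p ∈ abh, a ∈ p.2)) = 0)),
       (PySem.Set.ofList attr).filter (fun a => decide (pvMask (decide (∃ p ∈ abh, a ∈ p.1)) (decide (∃ p ∈ abh, a ∈ p.2)) = 1)),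
       (PySem.Set.ofList attr).filter (fun a => decide (pvMask (decide (∃ p ∈ abh, a ∈ p.1)) (decide (∃ p ∈ abh, a ∈ p.2)) = 2)),
       (PySem.Set.ofList attr).filter (fun a => decide (pvMask (decide (∃ p ∈ abh, a ∈ p.1)) (decide (∃ p ∈ abh, a ∈ p.2)) ≠ 0 ∧ pvMask (decide (∃ p ∈ abh, a ∈ p.1)) (decide (∃ p ∈ abh, a ∈ p.2)) ≠ 1 ∧ pvMask (decide (∃ p ∈ abh, a ∈ p.1)) (decide (∃ p ∈ abh, a ∈ p.2)) ≠ 2))) := by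
  have hinit : ∀ a, (PySem.Dict.ofList (attr.map (fun a => (a, (0:Int))))).getD a 0
      = pvMask false false := by
    intro a
    have hz : pvMask false false = 0 := by decide
    rw [hz]
    show ((attr.map (fun a => (a, (0:Int)))).foldl (fun acc p => acc.insert p.1 p.2)
      PySem.Dict.empty).getD a 0 = 0
    refine pv_getD_init _ _ (fun b => by simp [PySem.Dict.getD_empty]) ?_ a
    intro q hq
    obtain ⟨b, _, rfl⟩ := List.mem_map.mp hq
    rfl
  have hval := fun a => pv_outer abh _ (fun _ => false) (fun _ => false) hinit a
  simp only [Bool.false_or] at hval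
  have hk0 : (PySem.Dict.ofList (attr.map (fun a => (a, (0:Int))))).keys
      = PySem.Set.ofList attr := by
    show ((attr.map (fun a => (a, (0:Int)))).foldl (fun acc p => acc.insert p.1 p.2)
      PySem.Dict.empty).keys = _
    rw [PySem.Dict.keys_foldl_insert_key (key := Prod.fst) (f := fun d p => p.2)]
    simp [PySem.Dict.keys_empty, PySem.Set.update_nil_left, List.map_map, Function.comp_def]
  have hkeys := pv_keys_loop abh attr _ hk0 hin
  have hnd : ((abh.foldl (fun d p =>
      let d := p.1.foldl (fun d l => d.insert l (PySem.Int.bor (d.getD l 0) 1)) d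
      p.2.foldl (fun d r => d.insert r (PySem.Int.bor (d.getD r 0) 2)) d)
      (PySem.Dict.ofList (attr.map (fun a => (a, (0:Int))))))).keys.Nodup := by
    rw [hkeys]
    exact PySem.Set.nodup_ofList attr
  unfold keyBaseSets
  dsimp only
  rw [pv_items_eq _ hnd, hkeys]
  rw [List.map_congr_left (g := fun a => (a, pvMask (decide (∃ p ∈ abh, a ∈ p.1)) (decide (∃ p ∈ abh, a ∈ p.2)))) (fun a _ => by rw [hval a])]
  rw [pv_buckets _ _ _ _ _ (by
        simp only [List.map_map]
        rw [show (Prod.fst ∘ fun a : String => (a, pvMask (decide (∃ p ∈ abh, a ∈ p.1)) (decide (∃ p ∈ abh, a ∈ p.2)))) = id from rfl, List.map_id]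
        exact PySem.Set.nodup_ofList attr)
        (by intro x _; simp [PySem.Set.empty])]
  rw [pv_map_filter _ _ (fun z => decide (z = 0)), pv_map_filter _ _ (fun z => decide (z = 1)),
      pv_map_filter _ _ (fun z => decide (z = 2)),
      pv_map_filter _ _ (fun z => decide (z ≠ 0 ∧ z ≠ 1 ∧ z ≠ 2))]
  simp [PySem.Set.empty]

theorem pv_main (attr : List String) (abh : List (List String × List String))
    (hpre : Pre_keyBaseSets attr abh) : keyBaseSets attr abh = keyBaseSets_alt attr abh := by
  rw [pv_A_form attr abh hpre]
  unfold keyBaseSets_alt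
  dsimp only
  rw [PySem.List.foldl_prod_mk (fun s p => PySem.Set.update s p.1)
      (fun s p => PySem.Set.update s p.2) abh PySem.Set.empty PySem.Set.empty]
  dsimp only
  have hL : ∀ a, (PySem.Set.contains (abh.foldl (fun s p => PySem.Set.update s p.1) PySem.Set.empty) a)
      = decide (∃ p ∈ abh, a ∈ p.1) := by
    intro a
    have hm : a ∈ abh.foldl (fun s p => PySem.Set.update s p.1) PySem.Set.empty
        ↔ (∃ p ∈ abh, a ∈ p.1) := by
      rw [pv_mem_foldl_update Prod.fst abh PySem.Set.empty a]
      simp [PySem.Set.empty]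
    by_cases hx : ∃ p ∈ abh, a ∈ p.1
    · simpa [hx, PySem.Set.empty] using hm.mpr hx
    · simpa [hx, PySem.Set.empty] using fun hc => hx (hm.mp hc)
  have hR : ∀ a, (PySem.Set.contains (abh.foldl (fun s p => PySem.Set.update s p.2) PySem.Set.empty) a)
      = decide (∃ p ∈ abh, a ∈ p.2) := by
    intro a
    have hm : a ∈ abh.foldl (fun s p => PySem.Set.update s p.2) PySem.Set.empty
        ↔ (∃ p ∈ abh, a ∈ p.2) := by
      rw [pv_mem_foldl_update Prod.snd abh PySem.Set.empty a]
      simp [PySem.Set.empty]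
    by_cases hx : ∃ p ∈ abh, a ∈ p.2
    · simpa [hx, PySem.Set.empty] using hm.mpr hx
    · simpa [hx, PySem.Set.empty] using fun hc => hx (hm.mp hc)
  simp only [hL, hR, pv_ofList_filter]
  simp only [Prod.mk.injEq]
  refine ⟨?_, ?_, ?_, ?_⟩ <;>
  · refine List.filter_congr ?_
    intro a _
    by_cases hl : ∃ p ∈ abh, a ∈ p.1 <;> by_cases hr : ∃ p ∈ abh, a ∈ p.2 <;>
      simp [hl, hr, pvMask]

-- ===== VERDICT (by name: the statement is the Claim_ definition above) =====
theorem keyBaseSets_spec : Claim_equal_keyBaseSets := by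
  intro attr abh _ hpre
  exact pv_main attr abh hpre
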